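-- pv_equiv track=rewrite | github.com/hugowxyz/proj-euler-python | p026.py | try_guess
-- ===== SOURCE A (Python) =====
-- def try_guess(digits, length):
--     for a in digits:
--         for j in range(0, len(digits[a])):
--             flag = True
--             for k in range(2, 6):
--                 if digits[a][j] + k * length not in digits[a]:
--                     flag = False
--                     break
--             if flag:
--                 return True
--     return False
-- ===== SOURCE B (Python) =====
-- def try_guess(digits, length):
--     for a in digits:
--         s = set(digits[a])
--         cand = s
--         for k in range(2, 6):
--             cand = cand & {x - k * length for x in s}
--         if cand:
--             return True
--     return False
-- ===== Notes on version B (the rewrite author's own statement) =====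
-- stated objective: alternative
-- what changed: The triple nested loop with flag/break and element-by-element list-membership probes is replaced by per-key set algebra: intersect the digit set with its four shifted copies and test nonemptiness; it trades A's early break for bulk set operations.
import Mathlib
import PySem

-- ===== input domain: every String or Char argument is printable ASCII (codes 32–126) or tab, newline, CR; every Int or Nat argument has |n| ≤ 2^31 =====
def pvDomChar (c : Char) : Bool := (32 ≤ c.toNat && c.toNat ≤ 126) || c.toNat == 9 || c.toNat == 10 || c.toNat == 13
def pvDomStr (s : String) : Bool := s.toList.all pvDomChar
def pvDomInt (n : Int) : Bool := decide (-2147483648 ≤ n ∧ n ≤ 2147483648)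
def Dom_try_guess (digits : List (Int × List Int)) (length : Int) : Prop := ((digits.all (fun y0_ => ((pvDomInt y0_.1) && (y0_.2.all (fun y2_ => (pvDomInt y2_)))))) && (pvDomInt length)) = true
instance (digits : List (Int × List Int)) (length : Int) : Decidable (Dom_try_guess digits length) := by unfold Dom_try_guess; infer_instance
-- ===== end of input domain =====

-- B replaces A's triple nested loop (flag/break, list-membership probes) by per-key set
-- intersections of the digit set with its four shifted copies; objective: alternative algorithm.

-- ===== PORT A =====
-- inner 'for k in range(2, 6)' with flag/break: flag stays True iff every probe is a member
def tgA_kloop (lst0 : List Int) (length x : Int) : List Int → Bool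
  | [] => true
  | k :: ks => if lst0.contains (x + k * length) then tgA_kloop lst0 length x ks else false

-- 'for j in range(0, len(lst))' visiting lst[j]; returns True at the first j whose flag survives
def tgA_jloop (lst0 : List Int) (length : Int) : List Int → Bool
  | [] => false
  | x :: rest =>
    if tgA_kloop lst0 length x (PySem.List.pyRange 2 6 1) then true
    else tgA_jloop lst0 length rest

-- 'for a in digits' over the dict's keys, looking lst = digits[a] up in the dict each time
def tgA_outer (digits : List (Int × List Int)) (length : Int) : List (Int × List Int) → Bool
  | [] => false
  | (a, _) :: rest =>
    let lst := ((PySem.Dict.mk digits).get? a).getD []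
    if tgA_jloop lst length lst then true else tgA_outer digits length rest

def try_guess (digits : List (Int × List Int)) (length : Int) : Bool :=
  tgA_outer digits length digits

-- ===== PORT B =====
-- s = set(digits[a]); cand = s ∩ {x-2L..} ∩ {x-3L..} ∩ {x-4L..} ∩ {x-5L..}; return True iff cand nonempty
def tgB_check (lst : List Int) (length : Int) : Bool :=
  let s : PySem.Set Int := PySem.Set.ofList lst
  let cand := (PySem.List.pyRange 2 6 1).foldl
    (fun cand k => PySem.Set.inter cand (PySem.Set.ofList (s.map (fun x => x - k * length)))) s
  !cand.isEmpty

def tgB_outer (digits : List (Int × List Int)) (length : Int) : List (Int × List Int) → Bool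
  | [] => false
  | (a, _) :: rest =>
    if tgB_check (((PySem.Dict.mk digits).get? a).getD []) length then true
    else tgB_outer digits length rest

def try_guess_alt (digits : List (Int × List Int)) (length : Int) : Bool :=
  tgB_outer digits length digits

-- ===== PRECONDITION & SPEC =====
def Spec_try_guess (digits : List (Int × List Int)) (length : Int) (out : Bool) : Prop := out = try_guess_alt digits length
instance (digits : List (Int × List Int)) (length : Int) (out : Bool) : Decidable (Spec_try_guess digits length out) := by unfold Spec_try_guess; infer_instance

-- ===== CLAIM (what is proved, stated in full; the proofs are below) =====
def Claim_equal_try_guess : Prop := ∀ (digits : List (Int × List Int)) (length : Int), Dom_try_guess digits length → Spec_try_guess digits length (try_guess digits length)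

-- ===== LEMMAS AND PROOFS =====

lemma tgA_kloop_iff (lst0 : List Int) (length x : Int) (ks : List Int) :
    tgA_kloop lst0 length x ks = true ↔ ∀ k ∈ ks, (x + k * length) ∈ lst0 := by
  induction ks with
  | nil => simp [tgA_kloop]
  | cons k ks ih =>
    simp only [tgA_kloop, List.mem_cons]
    by_cases h : (x + k * length) ∈ lst0
    · simp [ih]
    · simp [h]  -- flag := False; break

lemma tgA_jloop_iff (lst0 : List Int) (length : Int) (ys : List Int) :
    tgA_jloop lst0 length ys = true ↔
      ∃ x ∈ ys, ∀ k ∈ PySem.List.pyRange 2 6 1, (x + k * length) ∈ lst0 := by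
  induction ys with
  | nil => simp [tgA_jloop]
  | cons x rest ih =>
    simp only [tgA_jloop]
    by_cases h : tgA_kloop lst0 length x (PySem.List.pyRange 2 6 1) = true
    · simp only [h, if_true, true_iff]
      exact ⟨x, List.mem_cons_self, (tgA_kloop_iff _ _ _ _).1 h⟩
    · rw [if_neg (by simp [h]), ih]
      constructor
      · rintro ⟨y, hy, hall⟩; exact ⟨y, List.mem_cons_of_mem _ hy, hall⟩
      · rintro ⟨y, hy, hall⟩
        rcases List.mem_cons.1 hy with rfl | hy'
        · exact absurd ((tgA_kloop_iff _ _ _ _).2 hall) h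
        · exact ⟨y, hy', hall⟩

lemma tgB_fold_mem (s : PySem.Set Int) (length : Int) (ks : List Int) (cand : PySem.Set Int) (x : Int) :
    x ∈ ks.foldl
        (fun cand k => PySem.Set.inter cand (PySem.Set.ofList (s.map (fun x => x - k * length)))) cand ↔
      x ∈ cand ∧ ∀ k ∈ ks, (x + k * length) ∈ s := by
  induction ks generalizing cand with
  | nil => simp
  | cons k ks ih =>
    simp only [List.foldl_cons, ih, PySem.Set.mem_inter, PySem.Set.mem_ofList, List.mem_map,
      List.mem_cons]
    constructor
    · rintro ⟨⟨hc, ⟨y, hy, rfl⟩⟩, hrest⟩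
      refine ⟨hc, ?_⟩
      rintro k' (rfl | hk')
      · simpa using hy
      · exact hrest k' hk'
    · rintro ⟨hc, hall⟩
      refine ⟨⟨hc, ⟨x + k * length, hall k (Or.inl rfl), by ring⟩⟩, fun k' hk' => hall k' (Or.inr hk')⟩

lemma tgB_check_iff (lst : List Int) (length : Int) :
    tgB_check lst length = true ↔
      ∃ x ∈ lst, ∀ k ∈ PySem.List.pyRange 2 6 1, (x + k * length) ∈ lst := by
  unfold tgB_check
  rw [Bool.not_eq_true', List.isEmpty_eq_false_iff_exists_mem]
  constructor
  · rintro ⟨x, hx⟩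
    rw [tgB_fold_mem] at hx
    exact ⟨x, (PySem.Set.mem_ofList _ _).1 hx.1, fun k hk => (PySem.Set.mem_ofList _ _).1 (hx.2 k hk)⟩
  · rintro ⟨x, hx, hall⟩
    exact ⟨x, (tgB_fold_mem _ _ _ _ _).2
      ⟨(PySem.Set.mem_ofList _ _).2 hx, fun k hk => (PySem.Set.mem_ofList _ _).2 (hall k hk)⟩⟩

lemma check_eq (lst : List Int) (length : Int) :
    tgA_jloop lst length lst = tgB_check lst length := by
  rcases hb : tgB_check lst length with _ | _
  · rw [← Bool.not_eq_true] at hb ⊢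
    rw [tgB_check_iff] at hb
    rw [tgA_jloop_iff]
    exact hb
  · rw [tgA_jloop_iff]
    exact (tgB_check_iff lst length).1 hb

lemma outer_eq (digits : List (Int × List Int)) (length : Int) (it : List (Int × List Int)) :
    tgA_outer digits length it = tgB_outer digits length it := by
  induction it with
  | nil => rfl
  | cons p rest ih =>
    obtain ⟨a, v⟩ := p
    simp only [tgA_outer, tgB_outer, check_eq, ih]

-- ===== VERDICT (by name: the statement is the Claim_ definition above) =====
theorem try_guess_spec : Claim_equal_try_guess := by
  intro digits length _
  unfold Spec_try_guess try_guess try_guess_alt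
  exact outer_eq digits length digits
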